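-- pv_equiv track=rewrite | github.com/Wizmann/ACM-ICPC | Leetcode/Algorithm/python/2000/02644-Find the Maximum Divisibility Score.py | maxDivScore
-- ===== SOURCE A (Python) =====
-- def maxDivScore(nums, divisors):
--     maxv = -1
--     maxi = -1
--
--     for div in sorted(set(divisors)):
--         cnt = 0
--         for num in nums:
--             cnt += 1 if num % div == 0 else 0
--         if cnt > maxv:
--             maxv = cnt
--             maxi = div
--     return maxi
-- ===== SOURCE B (Python) =====
-- def maxDivScore(nums, divisors):
--     counts = dict.fromkeys(divisors, 0)
--     order = list(counts)
--     for num in nums: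
--         for d in order:
--             if num % d == 0:
--                 counts[d] += 1
--     best_cnt = -1
--     best_div = -1
--     for d in sorted(order):
--         if counts[d] > best_cnt:
--             best_cnt = counts[d]
--             best_div = d
--     return best_div
-- ===== Notes on version B (the rewrite author's own statement) =====
-- stated objective: alternative
-- what changed: A interleaves counting and selection in one divisor-outer loop; B first builds a count table with a nums-outer / distinct-divisors-inner loop, then selects the best divisor in a separate scan over the sorted distinct divisors.
-- outside the precondition, e.g. on maxDivScore([5], [0]): A raises ZeroDivisionError, B raises ZeroDivisionError
import Mathlib
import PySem

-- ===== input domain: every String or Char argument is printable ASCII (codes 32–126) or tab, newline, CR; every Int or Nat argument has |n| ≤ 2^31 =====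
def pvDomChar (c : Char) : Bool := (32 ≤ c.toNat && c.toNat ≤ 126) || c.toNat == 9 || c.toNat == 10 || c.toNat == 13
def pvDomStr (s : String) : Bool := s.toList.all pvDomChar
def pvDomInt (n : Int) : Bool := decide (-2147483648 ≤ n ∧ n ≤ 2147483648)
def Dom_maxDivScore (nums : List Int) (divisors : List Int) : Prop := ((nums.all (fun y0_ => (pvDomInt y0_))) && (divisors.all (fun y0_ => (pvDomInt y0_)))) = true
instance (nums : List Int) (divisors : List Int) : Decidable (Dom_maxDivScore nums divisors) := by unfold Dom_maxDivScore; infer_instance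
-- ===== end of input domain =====

-- B replaces A's interleaved count-and-select (divisor-outer loop) with two separate passes:
-- a count table built by a nums-outer / distinct-divisors-inner loop, then a selection scan
-- over the sorted distinct divisors; objective: alternative decomposition, same asymptotic cost.

-- ===== PORT A =====
def maxDivScore (nums : List Int) (divisors : List Int) : Int :=
  ((PySem.List.sorted (PySem.Set.ofList divisors) (fun x => x) false).foldl
    (fun (st : Int × Int) div =>
      let cnt := nums.foldl (fun c num => c + (if PySem.Int.mod num div == 0 then 1 else 0)) 0
      if cnt > st.1 then (cnt, div) else st)
    (-1, -1)).2

-- ===== PORT B =====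
-- one inner-loop step of B's counting pass: 'if num % d == 0: counts[d] += 1'
def bCountStep (num : Int) (acc : PySem.Dict Int Int) (d : Int) : PySem.Dict Int Int :=
  if PySem.Int.mod num d == 0 then acc.modify d 0 (· + 1) else acc

def maxDivScore_alt (nums : List Int) (divisors : List Int) : Int :=
  let counts0 : PySem.Dict Int Int := divisors.foldl (fun d k => d.insert k 0) PySem.Dict.empty
  let order := counts0.keys
  let counts := nums.foldl (fun acc num => order.foldl (bCountStep num) acc) counts0
  ((PySem.List.sorted order (fun x => x) false).foldl
    (fun (st : Int × Int) d => if counts.getD d 0 > st.1 then (counts.getD d 0, d) else st)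
    (-1, -1)).2

-- ===== PRECONDITION & SPEC =====
-- Pre_ excludes 0 ∈ divisors: there Python's 'num % 0' raises ZeroDivisionError in A (and in B).
def Pre_maxDivScore (nums : List Int) (divisors : List Int) : Prop := (0 : Int) ∉ divisors
instance (nums : List Int) (divisors : List Int) : Decidable (Pre_maxDivScore nums divisors) := by unfold Pre_maxDivScore; infer_instance
def pvWitness_maxDivScore : List Int × List Int := ([6, 4, 9], [2, 3, 3])

def Spec_maxDivScore (nums : List Int) (divisors : List Int) (out : Int) : Prop := out = maxDivScore_alt nums divisors
instance (nums : List Int) (divisors : List Int) (out : Int) : Decidable (Spec_maxDivScore nums divisors out) := by unfold Spec_maxDivScore; infer_instance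

-- ===== CLAIM (what is proved, stated in full; the proofs are below) =====
def Claim_equal_maxDivScore : Prop := ∀ (nums : List Int) (divisors : List Int), Dom_maxDivScore nums divisors → Pre_maxDivScore nums divisors → Spec_maxDivScore nums divisors (maxDivScore nums divisors)

-- ===== LEMMAS AND PROOFS =====

-- B's initial table maps every key to 0
lemma getD_init_zero (divisors : List Int) (acc : PySem.Dict Int Int) (x : Int)
    (h : acc.getD x 0 = 0) :
    (divisors.foldl (fun d k => d.insert k (0 : Int)) acc).getD x 0 = 0 := by
  induction divisors generalizing acc with
  | nil => simpa using h
  | cons k rest ih =>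
      simp only [List.foldl_cons]
      exact ih _ (by rw [PySem.Dict.getD_insert]; split <;> simp [h])

-- the inner counting loop leaves keys outside the list untouched
lemma getD_inner_not_mem (num : Int) (l : List Int) (acc : PySem.Dict Int Int) (d : Int)
    (hd : d ∉ l) :
    (l.foldl (bCountStep num) acc).getD d 0 = acc.getD d 0 := by
  induction l generalizing acc with
  | nil => rfl
  | cons x rest ih =>
      simp only [List.foldl_cons]
      rw [ih _ (by simp_all)]
      unfold bCountStep
      split
      · rw [PySem.Dict.getD_modify]; simp_all
      · rfl

-- one pass of the inner counting loop adds num's contribution to key d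
lemma getD_inner_mem (num : Int) (l : List Int) (acc : PySem.Dict Int Int) (d : Int)
    (hl : l.Nodup) (hd : d ∈ l) :
    (l.foldl (bCountStep num) acc).getD d 0
      = acc.getD d 0 + (if PySem.Int.mod num d == 0 then 1 else 0) := by
  induction l generalizing acc with
  | nil => simp at hd
  | cons x rest ih =>
      simp only [List.foldl_cons]
      rcases List.mem_cons.mp hd with h | h
      · subst h
        rw [getD_inner_not_mem _ _ _ _ (by simp_all)]
        unfold bCountStep
        split
        · rw [PySem.Dict.getD_modify]; simp_all
        · simp_all
      · rw [ih _ (List.Nodup.of_cons hl) h]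
        congr 1
        unfold bCountStep
        split
        · rw [PySem.Dict.getD_modify]
          have : d ≠ x := by rintro rfl; simp [h] at hl
          simp [this]
        · rfl

-- the whole counting pass: final table value at d = initial value + number of divisible nums
lemma getD_counts (nums : List Int) (l : List Int) (acc : PySem.Dict Int Int) (d : Int)
    (hl : l.Nodup) (hd : d ∈ l) :
    (nums.foldl (fun acc num => l.foldl (bCountStep num) acc) acc).getD d 0
      = acc.getD d 0 + (nums.map (fun num => if PySem.Int.mod num d == 0 then (1 : Int) else 0)).sum := by
  induction nums generalizing acc with
  | nil => simp
  | cons n rest ih =>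
      simp only [List.foldl_cons, List.map_cons, List.sum_cons]
      rw [ih _, getD_inner_mem _ _ _ _ hl hd]
      ring

-- ===== VERDICT (by name: the statement is the Claim_ definition above) =====
theorem maxDivScore_spec : Claim_equal_maxDivScore := by
  intro nums divisors _ _
  unfold Spec_maxDivScore maxDivScore maxDivScore_alt
  have hkeys : (divisors.foldl (fun d k => d.insert k (0 : Int)) PySem.Dict.empty).keys
      = PySem.Set.ofList divisors := by
    rw [PySem.Dict.keys_foldl_insert, PySem.Dict.keys_empty, PySem.Set.update_nil_left]
  simp only [hkeys]
  congr 1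
  apply PySem.List.foldl_congr_mem'
  intro d hd st
  have hdmem : d ∈ PySem.Set.ofList divisors := (PySem.List.mem_sorted _ _ _ _).mp hd
  rw [getD_counts nums _ _ d (PySem.Set.nodup_ofList divisors) hdmem,
      getD_init_zero divisors PySem.Dict.empty d (by rw [PySem.Dict.getD_empty])]
  have hf : nums.foldl (fun c num => c + if PySem.Int.mod num d == 0 then (1 : Int) else 0) 0
      = 0 + (nums.map (fun num => if PySem.Int.mod num d == 0 then (1 : Int) else 0)).sum :=
    PySem.List.foldl_add _ _ _
  rw [hf]
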